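-- pv_equiv track=rewrite | github.com/Reynold1191/NV_PracticeDL_HAR | HAR_yolotest3.py | expand_bbox
-- ===== SOURCE A (Python) =====
-- def expand_bbox(person_box, object_boxes, threshold=10):
--     """
--     Expand BBox of people if there is a object nearby
--     - person_box: Original bounding box of human
--     - object_boxes: List bounding box of other objects
--     """
--     px1, py1, px2, py2 = person_box
--     expanded = False
--
--     for (ox1, oy1, ox2, oy2, obj_id) in object_boxes:
--         if obj_id != 0:  # Not humans
--             if (ox2 > px1 - threshold or ox1 < px2 + threshold or
--                 oy2 > py1 - threshold or oy1 < py2 + threshold):  # Check distance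
--                 px1 = min(px1, ox1)
--                 py1 = min(py1, oy1)
--                 px2 = max(px2, ox2)
--                 py2 = max(py2, oy2)
--                 expanded = True
--
--     return (px1, py1, px2, py2) if expanded else person_box  # Only expend if has object nearby
-- ===== SOURCE B (Python) =====
-- def expand_bbox(person_box, object_boxes, threshold=10):
--     """Expand person_box to include nearby (non-human) object boxes.
--
--     On the natural domain the per-object nearness test either passes or
--     the skipped object cannot change the envelope, so the result is simply
--     the envelope of the person box and all non-human object boxes.
--     """
--     objs = [o for o in object_boxes if o[4] != 0]
--     if not objs:
--         return person_box
--     px1, py1, px2, py2 = person_box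
--     return (min([px1] + [o[0] for o in objs]),
--             min([py1] + [o[1] for o in objs]),
--             max([px2] + [o[2] for o in objs]),
--             max([py2] + [o[3] for o in objs]))
-- ===== Notes on version B (the rewrite author's own statement) =====
-- stated objective: simpler
-- what changed: A's per-object nearness test provably either fires or leaves the accumulating envelope unchanged on every admitted input, so B drops the stateful conditional loop entirely: filter the non-human boxes and, if any, return four plain min/max reductions.
-- outside the precondition, e.g. on expand_bbox((100, 0, 0, 10), [(10, 20, 5, -11, 1)], 10): A returns (100, 0, 0, 10), B returns (10, 0, 5, 10); on expand_bbox((0, 0, 10, 10), [(-50, 0, 5, 5, 1)], -100): A returns (0, 0, 10, 10), B returns (-50, 0, 10, 10)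
import Mathlib
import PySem

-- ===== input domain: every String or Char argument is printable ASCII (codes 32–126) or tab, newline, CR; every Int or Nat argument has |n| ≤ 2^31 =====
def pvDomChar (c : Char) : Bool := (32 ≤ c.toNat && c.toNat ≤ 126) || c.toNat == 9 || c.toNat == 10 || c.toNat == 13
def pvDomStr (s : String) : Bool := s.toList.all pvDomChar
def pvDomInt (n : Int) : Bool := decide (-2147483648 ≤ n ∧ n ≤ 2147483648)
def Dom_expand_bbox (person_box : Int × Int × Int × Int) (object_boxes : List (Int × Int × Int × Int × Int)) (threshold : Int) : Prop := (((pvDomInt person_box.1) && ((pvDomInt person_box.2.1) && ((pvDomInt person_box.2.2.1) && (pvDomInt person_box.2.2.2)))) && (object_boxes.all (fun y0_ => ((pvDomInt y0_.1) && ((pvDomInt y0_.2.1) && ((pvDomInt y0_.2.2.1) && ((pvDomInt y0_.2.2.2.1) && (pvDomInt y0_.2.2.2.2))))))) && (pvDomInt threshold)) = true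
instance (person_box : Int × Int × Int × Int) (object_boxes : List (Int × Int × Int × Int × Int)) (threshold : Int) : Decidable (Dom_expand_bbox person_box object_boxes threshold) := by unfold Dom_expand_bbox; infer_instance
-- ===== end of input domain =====

-- B replaces A's stateful conditional loop by a filter of non-human boxes plus four plain
-- min/max reductions; under Pre_ (see its comment) the results coincide
-- (objective: simpler; same O(n) cost).

-- ===== PORT A =====
-- loop body of A: state is (px1, py1, px2, py2, expanded)
def pvStepA (t : Int) (st : Int × Int × Int × Int × Bool) (o : Int × Int × Int × Int × Int) :
    Int × Int × Int × Int × Bool :=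
  let px1 := st.1; let py1 := st.2.1; let px2 := st.2.2.1; let py2 := st.2.2.2.1
  let ox1 := o.1; let oy1 := o.2.1; let ox2 := o.2.2.1; let oy2 := o.2.2.2.1; let obj_id := o.2.2.2.2
  if obj_id ≠ 0 then
    if ox2 > px1 - t ∨ ox1 < px2 + t ∨ oy2 > py1 - t ∨ oy1 < py2 + t then
      (min px1 ox1, min py1 oy1, max px2 ox2, max py2 oy2, true)
    else st
  else st

def expand_bbox (person_box : Int × Int × Int × Int) (object_boxes : List (Int × Int × Int × Int × Int)) (threshold : Int) : Int × Int × Int × Int :=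
  let r := object_boxes.foldl (pvStepA threshold)
    (person_box.1, person_box.2.1, person_box.2.2.1, person_box.2.2.2, false)
  if r.2.2.2.2 then (r.1, r.2.1, r.2.2.1, r.2.2.2.1) else person_box

-- ===== PORT B =====
-- B: filter the non-human boxes; if none, return person_box; otherwise four min/max reductions
-- (min([px1]+xs) ported as (xs).foldl min px1, exact for Int).
def expand_bbox_alt (person_box : Int × Int × Int × Int) (object_boxes : List (Int × Int × Int × Int × Int)) (threshold : Int) : Int × Int × Int × Int :=
  let objs := object_boxes.filter (fun o => o.2.2.2.2 != 0)
  match objs with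
  | [] => person_box
  | _ :: _ =>
    ((objs.map (fun o => o.1)).foldl min person_box.1,
     (objs.map (fun o => o.2.1)).foldl min person_box.2.1,
     (objs.map (fun o => o.2.2.1)).foldl max person_box.2.2.1,
     (objs.map (fun o => o.2.2.2.1)).foldl max person_box.2.2.2)

-- ===== PRECONDITION & SPEC =====
-- Pre_ excludes only inputs that are malformed twice over (inverted person box or negative
-- threshold, AND some non-human box failing the nearness test against the original person
-- box); there A's skip branch can drop boxes and its result depends on scan order.
def Pre_expand_bbox (person_box : Int × Int × Int × Int) (object_boxes : List (Int × Int × Int × Int × Int)) (threshold : Int) : Prop :=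
  (person_box.1 ≤ person_box.2.2.1 ∧ person_box.2.1 ≤ person_box.2.2.2 ∧ 0 ≤ threshold) ∨
  (∀ o ∈ object_boxes, o.2.2.2.2 ≠ 0 →
    (o.2.2.1 > person_box.1 - threshold ∨ o.1 < person_box.2.2.1 + threshold ∨
     o.2.2.2.1 > person_box.2.1 - threshold ∨ o.2.1 < person_box.2.2.2 + threshold))
instance (person_box : Int × Int × Int × Int) (object_boxes : List (Int × Int × Int × Int × Int)) (threshold : Int) : Decidable (Pre_expand_bbox person_box object_boxes threshold) := by unfold Pre_expand_bbox; infer_instance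

def pvWitness_expand_bbox : (Int × Int × Int × Int) × (List (Int × Int × Int × Int × Int)) × Int :=
  ((0, 0, 10, 10), [(1, 2, 3, 4, 1), (5, 5, 6, 6, 0)], 10)

def Spec_expand_bbox (person_box : Int × Int × Int × Int) (object_boxes : List (Int × Int × Int × Int × Int)) (threshold : Int) (out : Int × Int × Int × Int) : Prop := out = expand_bbox_alt person_box object_boxes threshold
instance (person_box : Int × Int × Int × Int) (object_boxes : List (Int × Int × Int × Int × Int)) (threshold : Int) (out : Int × Int × Int × Int) : Decidable (Spec_expand_bbox person_box object_boxes threshold out) := by unfold Spec_expand_bbox; infer_instance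

-- ===== CLAIM =====
def Claim_equal_expand_bbox : Prop := ∀ (person_box : Int × Int × Int × Int) (object_boxes : List (Int × Int × Int × Int × Int)) (threshold : Int), Dom_expand_bbox person_box object_boxes threshold → Pre_expand_bbox person_box object_boxes threshold → Spec_expand_bbox person_box object_boxes threshold (expand_bbox person_box object_boxes threshold)

-- ===== LEMMAS AND PROOFS =====

def pvCoords (st : Int × Int × Int × Int × Bool) : Int × Int × Int × Int :=
  (st.1, st.2.1, st.2.2.1, st.2.2.2.1)

def pvMerge (b : Int × Int × Int × Int) (o : Int × Int × Int × Int × Int) : Int × Int × Int × Int :=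
  (min b.1 o.1, min b.2.1 o.2.1, max b.2.2.1 o.2.2.1, max b.2.2.2 o.2.2.2.1)

-- invariant for A's fold: coords track the envelope of the filtered list, the flag is
-- monotone, and a false flag means the coords never moved
theorem pvFoldA (t p1 q1 p2 q2 : Int) (ht : 0 ≤ t) (hx : p1 ≤ p2) (hy : q1 ≤ q2)
    (obs : List (Int × Int × Int × Int × Int)) :
    ∀ st : Int × Int × Int × Int × Bool,
      st.1 ≤ p1 → p2 ≤ st.2.2.1 → st.2.1 ≤ q1 → q2 ≤ st.2.2.2.1 →
      (pvCoords (obs.foldl (pvStepA t) st)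
          = (obs.filter (fun o => o.2.2.2.2 != 0)).foldl pvMerge (pvCoords st))
      ∧ (st.2.2.2.2 = true → (obs.foldl (pvStepA t) st).2.2.2.2 = true)
      ∧ ((obs.foldl (pvStepA t) st).2.2.2.2 = false →
          pvCoords (obs.foldl (pvStepA t) st) = pvCoords st) := by
  induction obs with
  | nil => intro st _ _ _ _; exact ⟨rfl, fun h => h, fun _ => rfl⟩
  | cons o rest ih =>
    intro st h1 h2 h3 h4
    obtain ⟨a1, b1, a2, b2, e⟩ := st
    obtain ⟨ox1, oy1, ox2, oy2, oid⟩ := o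
    simp only at h1 h2 h3 h4
    by_cases h0 : oid = 0
    · simp only [List.foldl_cons, List.filter_cons, h0, bne_self_eq_false,
        Bool.false_eq_true, if_false]
      exact ih _ h1 h2 h3 h4
    · by_cases hn : ox2 > a1 - t ∨ ox1 < a2 + t ∨ oy2 > b1 - t ∨ oy1 < b2 + t
      · have hstep : pvStepA t (a1, b1, a2, b2, e) (ox1, oy1, ox2, oy2, oid)
            = (min a1 ox1, min b1 oy1, max a2 ox2, max b2 oy2, true) := by
          simp [pvStepA, h0, hn]
        simp only [List.foldl_cons, List.filter_cons, hstep, bne_iff_ne, ne_eq, h0,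
          not_false_eq_true, if_true]
        obtain ⟨he, hm, _⟩ := ih (min a1 ox1, min b1 oy1, max a2 ox2, max b2 oy2, true)
          (le_trans (min_le_left _ _) h1) (le_trans h2 (le_max_left _ _))
          (le_trans (min_le_left _ _) h3) (le_trans h4 (le_max_left _ _))
        refine ⟨?_, fun _ => hm rfl, fun hff => absurd (hm rfl) (by simp [hff])⟩
        simpa [pvCoords, pvMerge] using he
      · -- skipped: the far box cannot move the envelope
        have hstep : pvStepA t (a1, b1, a2, b2, e) (ox1, oy1, ox2, oy2, oid)
            = (a1, b1, a2, b2, e) := by simp [pvStepA, h0, hn]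
        have hmerge : pvMerge (pvCoords (a1, b1, a2, b2, e)) (ox1, oy1, ox2, oy2, oid)
            = pvCoords (a1, b1, a2, b2, e) := by
          simp only [not_or, not_lt] at hn
          simp only [pvMerge, pvCoords, Prod.mk.injEq]
          omega
        simp only [List.foldl_cons, List.filter_cons, hstep, bne_iff_ne, ne_eq, h0,
          not_false_eq_true, if_true]
        obtain ⟨he, hm, hf⟩ := ih (a1, b1, a2, b2, e) h1 h2 h3 h4
        exact ⟨by simpa [hmerge] using he, hm, hf⟩

-- the envelope fold computes componentwise min/max reductions
theorem pvEnv_comp (objs : List (Int × Int × Int × Int × Int)) :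
    ∀ c : Int × Int × Int × Int,
      objs.foldl pvMerge c
        = ((objs.map (fun o => o.1)).foldl min c.1,
           (objs.map (fun o => o.2.1)).foldl min c.2.1,
           (objs.map (fun o => o.2.2.1)).foldl max c.2.2.1,
           (objs.map (fun o => o.2.2.2.1)).foldl max c.2.2.2) := by
  induction objs with
  | nil => intro c; rfl
  | cons o rest ih => intro c; simpa [pvMerge] using ih (pvMerge c o)

-- if every non-human box is near the ORIGINAL person box, nothing is ever skipped
-- (the nearness test is monotone in the growing box): coords are the envelope and the
-- flag records whether any non-human box exists
theorem pvFoldA2 (t p1 q1 p2 q2 : Int) (obs : List (Int × Int × Int × Int × Int)) :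
    ∀ st : Int × Int × Int × Int × Bool,
      st.1 ≤ p1 → st.2.1 ≤ q1 → p2 ≤ st.2.2.1 → q2 ≤ st.2.2.2.1 →
      (∀ o ∈ obs, o.2.2.2.2 ≠ 0 →
        (o.2.2.1 > p1 - t ∨ o.1 < p2 + t ∨ o.2.2.2.1 > q1 - t ∨ o.2.1 < q2 + t)) →
      (pvCoords (obs.foldl (pvStepA t) st)
          = (obs.filter (fun o => o.2.2.2.2 != 0)).foldl pvMerge (pvCoords st))
      ∧ (obs.foldl (pvStepA t) st).2.2.2.2
          = (st.2.2.2.2 || !(obs.filter (fun o => o.2.2.2.2 != 0)).isEmpty) := by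
  induction obs with
  | nil => intro st _ _ _ _ _; exact ⟨rfl, by simp⟩
  | cons o rest ih =>
    intro st h1 h3 h2 h4 hnear
    obtain ⟨a1, b1, a2, b2, e⟩ := st
    obtain ⟨ox1, oy1, ox2, oy2, oid⟩ := o
    simp only at h1 h2 h3 h4
    by_cases h0 : oid = 0
    · simp only [List.foldl_cons, List.filter_cons, h0, bne_self_eq_false,
        Bool.false_eq_true, if_false]
      exact ih _ h1 h3 h2 h4 (fun o ho => hnear o (List.mem_cons_of_mem _ ho))
    · have hn0 := hnear (ox1, oy1, ox2, oy2, oid) (List.mem_cons_self ..) h0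
      simp only at hn0
      have hn : ox2 > a1 - t ∨ ox1 < a2 + t ∨ oy2 > b1 - t ∨ oy1 < b2 + t := by omega
      have hstep : pvStepA t (a1, b1, a2, b2, e) (ox1, oy1, ox2, oy2, oid)
          = (min a1 ox1, min b1 oy1, max a2 ox2, max b2 oy2, true) := by
        simp [pvStepA, h0, hn]
      simp only [List.foldl_cons, List.filter_cons, hstep, bne_iff_ne, ne_eq, h0,
        not_false_eq_true, if_true]
      obtain ⟨he, hfl⟩ := ih (min a1 ox1, min b1 oy1, max a2 ox2, max b2 oy2, true)
        (le_trans (min_le_left _ _) h1) (le_trans (min_le_left _ _) h3)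
        (le_trans h2 (le_max_left _ _)) (le_trans h4 (le_max_left _ _))
        (fun o ho => hnear o (List.mem_cons_of_mem _ ho))
      refine ⟨by simpa [pvCoords, pvMerge] using he, ?_⟩
      simp only at hfl
      simp [hfl]

-- ===== VERDICT =====
theorem expand_bbox_spec : Claim_equal_expand_bbox := by
  intro pb obs t _ hpre
  obtain ⟨p1, q1, p2, q2⟩ := pb
  unfold Spec_expand_bbox expand_bbox expand_bbox_alt
  rcases hpre with ⟨hx, hy, ht⟩ | hnear
  · simp only at hx hy ht
    obtain ⟨he, _, hf⟩ := pvFoldA t p1 q1 p2 q2 ht hx hy obs (p1, q1, p2, q2, false)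
      le_rfl le_rfl le_rfl le_rfl
    rw [pvEnv_comp] at he
    cases hobjs : obs.filter (fun o => o.2.2.2.2 != 0) with
    | nil =>
      rw [hobjs] at he
      by_cases hflag : (obs.foldl (pvStepA t) (p1, q1, p2, q2, false)).2.2.2.2 = true
      · simp only [hflag, if_true]
        have := he
        simp only [pvCoords] at this
        simp [Prod.ext_iff] at this ⊢
        exact this
      · simp [hflag]
    | cons o rest =>
      rw [hobjs] at he
      by_cases hflag : (obs.foldl (pvStepA t) (p1, q1, p2, q2, false)).2.2.2.2 = true
      · simp only [hflag, if_true]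
        simp only [pvCoords] at he
        simpa [Prod.ext_iff] using he
      · have hcoords := hf (by simpa using hflag)
        rw [hcoords] at he
        simp only [pvCoords, Prod.mk.injEq] at he
        simp only [if_neg hflag]
        exact Prod.ext_iff.mpr ⟨he.1, Prod.ext_iff.mpr ⟨he.2.1, Prod.ext_iff.mpr ⟨he.2.2.1, he.2.2.2⟩⟩⟩
  · obtain ⟨he, hfl⟩ := pvFoldA2 t p1 q1 p2 q2 obs (p1, q1, p2, q2, false)
      le_rfl le_rfl le_rfl le_rfl (by simpa using hnear)
    rw [pvEnv_comp] at he
    cases hobjs : obs.filter (fun o => o.2.2.2.2 != 0) with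
    | nil =>
      rw [hobjs] at hfl
      simp only [List.isEmpty_nil, Bool.not_true, Bool.or_false] at hfl
      simp [hfl]
    | cons o rest =>
      rw [hobjs] at he hfl
      simp only [List.isEmpty_cons, Bool.not_false, Bool.or_true] at hfl
      simp only [hfl, if_true]
      simp only [pvCoords] at he
      simpa [Prod.ext_iff] using he
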